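-- pv_equiv track=rewrite | github.com/fuentesmarlon/Sodoku---15Puzzle | sodoku.py | column
-- ===== SOURCE A (Python) =====
-- def column(sudoku):
--     listColumn=[]
--     for column in range(len(sudoku[0])):
--         value = 0
--         for row in sudoku:
--             value+=row[column]
--         if value==10:
--             listColumn.append(True)
--         else:
--             listColumn.append(False)
--     return listColumn
-- ===== SOURCE B (Python) =====
-- def column(sudoku):
--     def deficits(rows, col_count):
--         # how far each column still is from the target 10, built by recursion on the rows
--         if not rows:
--             return [10] * col_count
--         rest = deficits(rows[1:], col_count)
--         head = rows[0]
--         return [rest[c] - head[c] for c in range(col_count)]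
--     return [d == 0 for d in deficits(sudoku, len(sudoku[0]))]
-- ===== Notes on version B (the rewrite author's own statement) =====
-- stated objective: alternative
-- what changed: Replaces A's column-outer/row-inner nested accumulation loops with a structural recursion on the rows that builds a vector of remaining deficits from the target 10 (subtracting each row element-wise) and finally tests each deficit for zero.
import Mathlib
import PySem

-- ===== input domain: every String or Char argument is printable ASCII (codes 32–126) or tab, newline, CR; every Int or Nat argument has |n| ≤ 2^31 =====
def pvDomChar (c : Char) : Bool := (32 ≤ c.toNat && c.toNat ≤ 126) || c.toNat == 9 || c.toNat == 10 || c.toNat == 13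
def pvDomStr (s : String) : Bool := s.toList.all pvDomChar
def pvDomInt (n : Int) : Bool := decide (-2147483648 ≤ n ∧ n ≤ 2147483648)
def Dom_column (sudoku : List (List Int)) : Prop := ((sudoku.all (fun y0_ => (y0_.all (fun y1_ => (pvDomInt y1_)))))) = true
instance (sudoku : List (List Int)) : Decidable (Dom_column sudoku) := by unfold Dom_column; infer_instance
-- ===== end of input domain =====

-- B replaces A's nested summing loops with a structural recursion on the rows that
-- builds a vector of remaining deficits from the target 10, tested for zero at the end.

-- ===== PORT A =====
-- column-outer loop; for each column, a full pass over the rows accumulates the sum, then True/False is appended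
def column (sudoku : List (List Int)) : List Bool :=
  (PySem.List.pyRange 0 ((PySem.List.pyGetD sudoku 0 []).length : Int) 1).foldl
    (fun listColumn col =>
      let value := sudoku.foldl (fun value row => value + PySem.List.pyGetD row col 0) 0
      if value == 10 then listColumn ++ [true] else listColumn ++ [false]) []

-- ===== PORT B =====
-- recursion on the rows: empty → target vector [10]*n; otherwise subtract the head row
-- element-wise from the deficits of the remaining rows
def column_deficits (rows : List (List Int)) (n : Nat) : List Int :=
  match rows with
  | [] => List.replicate n 10
  | head :: rest_rows =>
    let rest := column_deficits rest_rows n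
    (PySem.List.pyRange 0 (n : Int) 1).map
      (fun c => PySem.List.pyGetD rest c 0 - PySem.List.pyGetD head c 0)

def column_alt (sudoku : List (List Int)) : List Bool :=
  (column_deficits sudoku (PySem.List.pyGetD sudoku 0 []).length).map (fun d => d == 0)

-- ===== PRECONDITION & SPEC =====
-- Pre_ excludes exactly the inputs where Python A raises an IndexError: the empty grid
-- (sudoku[0]) and ragged grids with a row shorter than the first row (row[column]).
def Pre_column (sudoku : List (List Int)) : Prop :=
  sudoku ≠ [] ∧ ∀ row ∈ sudoku, (sudoku.headD []).length ≤ row.length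
instance (sudoku : List (List Int)) : Decidable (Pre_column sudoku) := by
  unfold Pre_column; infer_instance
def pvWitness_column : List (List Int) := [[1, 2], [9, 3]]
def Spec_column (sudoku : List (List Int)) (out : List Bool) : Prop := out = column_alt sudoku
instance (sudoku : List (List Int)) (out : List Bool) : Decidable (Spec_column sudoku out) := by
  unfold Spec_column; infer_instance

-- ===== CLAIM (what is proved, stated in full; the proofs are below) =====
def Claim_equal_column : Prop := ∀ (sudoku : List (List Int)), Dom_column sudoku → Pre_column sudoku → Spec_column sudoku (column sudoku)

-- ===== LEMMAS AND PROOFS =====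

-- characterization of B's deficit vector: entry i is 10 minus the column-i sum
theorem pv_deficits_eq (rows : List (List Int)) (n : Nat) :
    column_deficits rows n =
      (List.range n).map (fun i : Nat => 10 - (rows.map (fun r => PySem.List.pyGetD r (i : Nat) 0)).sum) := by
  induction rows with
  | nil =>
      simp [column_deficits, List.map_const', List.length_range]
  | cons r rs ih =>
      rw [column_deficits, ih, PySem.List.pyRange_one (0 : Int) (n : Int)]
      simp only [sub_zero, Int.toNat_natCast, List.map_map]
      apply List.map_congr_left
      intro i hi
      rw [List.mem_range] at hi
      simp only [Function.comp_def, zero_add, PySem.List.pyGetD_natCast]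
      rw [List.getD_eq_getElem?_getD, List.getElem?_map,
        List.getElem?_range hi]
      simp only [Option.map_some, Option.getD_some, List.map_cons, List.sum_cons]
      ring

-- A's loop body rewritten as a single append of the boolean test
theorem pv_A_body (sudoku : List (List Int)) (acc : List Bool) (col : Int) :
    (let value := sudoku.foldl (fun value row => value + PySem.List.pyGetD row col 0) 0
     if value == 10 then acc ++ [true] else acc ++ [false]) =
    acc ++ [((sudoku.map (fun row => PySem.List.pyGetD row col 0)).sum == 10)] := by
  simp only [PySem.List.foldl_add (g := fun row => PySem.List.pyGetD row col 0), zero_add]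
  by_cases hv : (sudoku.map (fun row => PySem.List.pyGetD row col 0)).sum = 10
  · simp [hv]
  · simp [hv]

-- ===== VERDICT (by name: the statement is the Claim_ definition above) =====
theorem column_spec : Claim_equal_column := by
  intro sudoku _ _
  unfold Spec_column column column_alt
  set n : Nat := (PySem.List.pyGetD sudoku 0 []).length with hn
  have hA : (PySem.List.pyRange 0 (n : Int) 1).foldl
      (fun listColumn col =>
        let value := sudoku.foldl (fun value row => value + PySem.List.pyGetD row col 0) 0
        if value == 10 then listColumn ++ [true] else listColumn ++ [false]) [] =
      (PySem.List.pyRange 0 (n : Int) 1).map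
        (fun col => ((sudoku.map (fun row => PySem.List.pyGetD row col 0)).sum == 10)) := by
    rw [PySem.List.foldl_congr_mem _ _ _ _ (fun acc col _ => pv_A_body sudoku acc col)]
    rw [PySem.List.foldl_append_singleton_eq_map]
    simp
  rw [hA, pv_deficits_eq, PySem.List.pyRange_one (0 : Int) (n : Int)]
  simp only [sub_zero, Int.toNat_natCast, List.map_map]
  apply List.map_congr_left
  intro i _
  simp only [Function.comp_def, zero_add]
  have hb : ∀ s : Int, (s == 10) = (10 - s == 0) := by
    intro s
    by_cases h : s = 10
    · simp [h]
    · have h2 : 10 - s ≠ 0 := by omega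
      simp [h, h2]
  exact hb _
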